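-- pv_equiv track=rewrite | github.com/LaffeyBot/LaffeyBot | pcr/plugins/rank.py | position_on_rank
-- ===== SOURCE A (Python) =====
-- def position_on_rank(rank: list, name: str) -> int:
--     current_damage = 9999999999999999
--     current_best_index = 1
--     for index, element in enumerate(rank):
--         # 当多人伤害完全相同的时候，取最高排名
--         if element[1] < current_damage:
--             current_best_index = index + 1
--             current_damage = element[1]
--         if element[0] == name:
--             return current_best_index
--     return -1
-- ===== SOURCE B (Python) =====
-- def position_on_rank(rank: list, name: str) -> int:
--     # locate the first index whose name matches
--     j = -1
--     for k, element in enumerate(rank):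
--         if element[0] == name:
--             j = k
--             break
--     if j == -1:
--         return -1
--     # running-minimum pass over the prefix up to and including the match
--     current_damage = 9999999999999999
--     best = 1
--     for i, element in enumerate(rank[:j + 1]):
--         if element[1] < current_damage:
--             best = i + 1
--             current_damage = element[1]
--     return best
-- ===== Notes on version B (the rewrite author's own statement) =====
-- stated objective: alternative
-- what changed: Splits A's fused single loop (running minimum interleaved with the name test and an early return) into two separate passes: first locate the index j of the name, then an independent running-minimum scan over the prefix rank[:j+1].
import Mathlib
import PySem

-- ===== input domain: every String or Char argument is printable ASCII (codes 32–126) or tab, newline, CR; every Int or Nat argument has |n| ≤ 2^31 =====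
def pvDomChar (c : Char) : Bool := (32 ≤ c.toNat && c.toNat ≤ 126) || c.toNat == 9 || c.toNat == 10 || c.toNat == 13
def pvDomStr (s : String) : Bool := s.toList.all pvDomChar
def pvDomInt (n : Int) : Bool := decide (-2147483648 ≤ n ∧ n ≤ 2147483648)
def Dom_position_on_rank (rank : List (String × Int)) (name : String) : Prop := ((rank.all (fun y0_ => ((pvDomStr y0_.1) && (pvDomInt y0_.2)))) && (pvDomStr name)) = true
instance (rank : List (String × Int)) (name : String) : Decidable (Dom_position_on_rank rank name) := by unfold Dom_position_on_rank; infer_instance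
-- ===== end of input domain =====

-- B splits A's fused scan into locate-the-name then a separate running-minimum pass over that prefix (objective: alternative decomposition; same results).

-- ===== PORT A =====
-- A's single loop: running minimum and name test fused, early return at the match.
def aLoop : List (String × Int) → String → Int → Int → Nat → Int
  | [], _, _, _, _ => -1
  | (n, d) :: rest, name, cd, cb, i =>
    let cb' := if d < cd then (i : Int) + 1 else cb
    let cd' := if d < cd then d else cd
    if n == name then cb' else aLoop rest name cd' cb' (i + 1)

def position_on_rank (rank : List (String × Int)) (name : String) : Int :=
  aLoop rank name 9999999999999999 1 0

-- ===== PORT B =====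
-- first pass of B: find the index of the first matching name (break), none = j stays -1
def bFind : List (String × Int) → String → Nat → Option Nat
  | [], _, _ => none
  | (n, _) :: rest, name, k => if n == name then some k else bFind rest name (k + 1)

-- second pass of B: running minimum over the prefix rank[:j+1]
def bScan : List (String × Int) → Nat → Int → Int → Int
  | [], _, _, best => best
  | (_, d) :: rest, i, cd, best =>
    if d < cd then bScan rest (i + 1) d ((i : Int) + 1)
    else bScan rest (i + 1) cd best

def position_on_rank_alt (rank : List (String × Int)) (name : String) : Int :=
  match bFind rank name 0 with
  | none => -1
  | some j => bScan (rank.take (j + 1)) 0 9999999999999999 1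

-- ===== PRECONDITION & SPEC =====
def Spec_position_on_rank (rank : List (String × Int)) (name : String) (out : Int) : Prop := out = position_on_rank_alt rank name
instance (rank : List (String × Int)) (name : String) (out : Int) : Decidable (Spec_position_on_rank rank name out) := by unfold Spec_position_on_rank; infer_instance

-- ===== CLAIM (what is proved, stated in full; the proofs are below) =====
def Claim_equal_position_on_rank : Prop := ∀ (rank : List (String × Int)) (name : String), Dom_position_on_rank rank name → Spec_position_on_rank rank name (position_on_rank rank name)

-- ===== LEMMAS AND PROOFS =====

theorem bFind_shift (l : List (String × Int)) (name : String) (k : Nat) :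
    bFind l name k = (bFind l name 0).map (· + k) := by
  induction l generalizing k with
  | nil => simp [bFind]
  | cons hd tl ih =>
    obtain ⟨n, d⟩ := hd
    by_cases h : n == name
    · simp [bFind, h]
    · simp only [bFind, h, if_false, Bool.false_eq_true]
      rw [ih (k + 1), ih 1]
      cases bFind tl name 0 <;> simp <;> try omega

theorem aLoop_eq (l : List (String × Int)) (name : String) (cd cb : Int) (i : Nat) :
    aLoop l name cd cb i =
      match bFind l name 0 with
      | none => -1
      | some j => bScan (l.take (j + 1)) i cd cb := by
  induction l generalizing cd cb i with
  | nil => simp [aLoop, bFind]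
  | cons hd tl ih =>
    obtain ⟨n, d⟩ := hd
    by_cases h : n == name
    · by_cases hd : d < cd <;> simp [aLoop, bFind, bScan, h, hd]
    · simp only [aLoop, bFind, h, if_false, Bool.false_eq_true]
      rw [bFind_shift tl name 1, ih]
      cases hfj : bFind tl name 0 with
      | none => by_cases hd : d < cd <;> simp
      | some j =>
        by_cases hd : d < cd <;>
          simp [hd, List.take_succ_cons, bScan]

-- ===== VERDICT (by name: the statement is the Claim_ definition above) =====
theorem position_on_rank_spec : Claim_equal_position_on_rank := by
  intro rank name _
  unfold Spec_position_on_rank position_on_rank position_on_rank_alt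
  rw [aLoop_eq]
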